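-- pv_equiv track=rewrite | github.com/beyond-immersion/bannou-service | scripts/generate-faq-catalog.py | extract_short_answer
-- ===== SOURCE A (Python) =====
-- def extract_short_answer(content: str) -> str:
--     """Extract the > **Short Answer**: block including continuation lines.
--
--     Continuation lines start with '> ' but do not start with '> **'.
--     """
--     lines = content.split('\n')
--     result_lines = []
--     in_short_answer = False
--
--     for line in lines:
--         if not in_short_answer:
--             if line.startswith('> **Short Answer**:'):
--                 text = line.split(':', 1)[1].strip()
--                 result_lines.append(text)
--                 in_short_answer = True
--             continue
--
--         # Stop at non-blockquote or new field
--         if line.startswith('> **') or not line.startswith('>'):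
--             break
--
--         # Continuation line: strip '> ' or '>' prefix
--         if line.startswith('> '):
--             result_lines.append(line[2:])
--         else:
--             result_lines.append(line[1:])
--
--     return '\n'.join(result_lines)
-- ===== SOURCE B (Python) =====
-- def extract_short_answer(content: str) -> str:
--     """Find the first '> **Short Answer**:' line, measure the run of
--     continuation lines after it, then build the block in one comprehension."""
--     lines = content.split('\n')
--     hits = [(i, l) for i, l in enumerate(lines) if l.startswith('> **Short Answer**:')]
--     if not hits:
--         return ''
--     i, first = hits[0]
--     tail = lines[i + 1:]
--     n = 0
--     while n < len(tail) and tail[n].startswith('>') and not tail[n].startswith('> **'):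
--         n += 1
--     block = [first.split(':', 1)[1].strip()] + \
--             [l[2:] if l.startswith('> ') else l[1:] for l in tail[:n]]
--     return '\n'.join(block)
-- ===== Notes on version B (the rewrite author's own statement) =====
-- stated objective: alternative
-- what changed: Replaces A's single flag-carrying loop with early break by a three-phase decomposition: find the first header line via an enumerate-filter, measure the run of continuation lines with an index-advancing while, then build the block by mapping the prefix-strip over that slice.
import Mathlib
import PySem

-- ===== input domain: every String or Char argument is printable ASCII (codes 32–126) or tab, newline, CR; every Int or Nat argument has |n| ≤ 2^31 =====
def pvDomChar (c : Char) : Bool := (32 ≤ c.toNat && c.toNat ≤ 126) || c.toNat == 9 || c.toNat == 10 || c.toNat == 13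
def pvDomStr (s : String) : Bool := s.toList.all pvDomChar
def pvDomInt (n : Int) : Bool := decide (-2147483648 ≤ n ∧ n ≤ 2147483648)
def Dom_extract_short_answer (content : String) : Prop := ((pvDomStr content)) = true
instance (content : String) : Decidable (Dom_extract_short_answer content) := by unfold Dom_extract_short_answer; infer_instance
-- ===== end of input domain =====

-- B replaces A's flag-carrying single loop by a find-the-header / measure-the-run / map-a-slice decomposition (objective: alternative, same cost).

-- shared helper: both Pythons contain `line.split(':', 1)[1].strip()` verbatim
def esaText (line : String) : String :=
  PySem.Str.strip ((PySem.List.pyGet? ((PySem.Str.splitMax? line ":" 1).getD []) 1).getD "")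

def esaHdr : String := "> **Short Answer**:"

-- ===== PORT A =====
def esaLoopA : List String → List String → Bool → List String
  | [], acc, _ => acc
  | line :: rest, acc, ins =>
    if ins = false then
      if PySem.Str.startswith line esaHdr then
        esaLoopA rest (acc ++ [esaText line]) true
      else
        esaLoopA rest acc false
    else
      if PySem.Str.startswith line "> **" || !(PySem.Str.startswith line ">") then acc
      else if PySem.Str.startswith line "> " then
        esaLoopA rest (acc ++ [PySem.Str.slice line (some 2) none]) true
      else
        esaLoopA rest (acc ++ [PySem.Str.slice line (some 1) none]) true

def extract_short_answer (content : String) : String :=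
  PySem.Str.join "\n" (esaLoopA ((PySem.Str.split? content "\n").getD []) [] false)

-- ===== PORT B =====
def esaHits (lines : List String) : List (Int × String) :=
  (PySem.List.enumerate lines).filter (fun p => PySem.Str.startswith p.2 esaHdr)

-- the while loop advancing n over tail
def esaRun (tail : List String) (n : Nat) : Nat :=
  if h : n < tail.length then
    if PySem.Str.startswith tail[n] ">" && !(PySem.Str.startswith tail[n] "> **") then
      esaRun tail (n + 1)
    else n
  else n
termination_by tail.length - n

def esaMap (l : String) : String :=
  if PySem.Str.startswith l "> " then PySem.Str.slice l (some 2) none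
  else PySem.Str.slice l (some 1) none

def esaBMain (lines : List String) : String :=
  match esaHits lines with
  | [] => ""
  | (i, first) :: _ =>
    let tail := PySem.List.slice lines (some (i + 1)) none
    let n := esaRun tail 0
    PySem.Str.join "\n"
      (esaText first :: (PySem.List.slice tail none (some (n : Int))).map esaMap)

def extract_short_answer_alt (content : String) : String :=
  esaBMain ((PySem.Str.split? content "\n").getD [])

-- ===== PRECONDITION & SPEC =====
def Spec_extract_short_answer (content : String) (out : String) : Prop := out = extract_short_answer_alt content
instance (content : String) (out : String) : Decidable (Spec_extract_short_answer content out) := by unfold Spec_extract_short_answer; infer_instance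

-- ===== CLAIM (what is proved, stated in full; the proofs are below) =====
def Claim_equal_extract_short_answer : Prop := ∀ (content : String), Dom_extract_short_answer content → Spec_extract_short_answer content (extract_short_answer content)

-- ===== LEMMAS AND PROOFS =====

-- canonical list of result lines
def esaPhase2 : List String → List String
  | [] => []
  | l :: rest =>
    if PySem.Str.startswith l ">" && !(PySem.Str.startswith l "> **") then
      esaMap l :: esaPhase2 rest
    else []

def esaSpec : List String → List String
  | [] => []
  | l :: rest =>
    if PySem.Str.startswith l esaHdr then esaText l :: esaPhase2 rest
    else esaSpec rest

-- number of leading continuation lines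
def esaCnt : List String → Nat
  | [] => 0
  | l :: rest =>
    if PySem.Str.startswith l ">" && !(PySem.Str.startswith l "> **") then esaCnt rest + 1
    else 0

theorem esaLoopA_true (rest : List String) : ∀ acc, esaLoopA rest acc true = acc ++ esaPhase2 rest := by
  induction rest with
  | nil => intro acc; simp [esaLoopA, esaPhase2]
  | cons l r ih =>
    intro acc
    cases h1 : PySem.Chars.startswith l.toList ['>', ' ', '*', '*'] <;>
      cases h2 : PySem.Chars.startswith l.toList ['>'] <;>
        simp [esaLoopA, esaPhase2, esaMap, h1, h2, ih] <;> split_ifs <;> simp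

theorem esaLoopA_false (lines : List String) : ∀ acc, esaLoopA lines acc false = acc ++ esaSpec lines := by
  induction lines with
  | nil => intro acc; simp [esaLoopA, esaSpec]
  | cons l r ih =>
    intro acc
    by_cases h : PySem.Chars.startswith l.toList esaHdr.toList = true <;>
      simp [esaLoopA, esaSpec, h, ih, esaLoopA_true]

theorem esaRun_eq (tail : List String) (n : Nat) : esaRun tail n = n + esaCnt (tail.drop n) := by
  rw [esaRun]
  split
  case isTrue h =>
    have hd : tail.drop n = tail[n] :: tail.drop (n + 1) := List.drop_eq_getElem_cons h
    by_cases hb : (PySem.Str.startswith tail[n] ">" && !PySem.Str.startswith tail[n] "> **") = true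
    · rw [if_pos hb, esaRun_eq tail (n + 1), hd]
      simp at hb
      simp [esaCnt, hb.1, hb.2]
      omega
    · rw [if_neg hb, hd]
      simp at hb
      have hc : ¬(PySem.Chars.startswith tail[n].toList ['>'] = true ∧
          PySem.Chars.startswith tail[n].toList ['>', ' ', '*', '*'] = false) := by
        rintro ⟨ha, hbf⟩
        rw [hb ha] at hbf
        cases hbf
      simp [esaCnt, hc]
  case isFalse h =>
    have hd : tail.drop n = [] := List.drop_eq_nil_of_le (by omega)
    simp [hd, esaCnt]
termination_by tail.length - n

theorem esaPhase2_eq_take (tail : List String) :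
    (tail.take (esaCnt tail)).map esaMap = esaPhase2 tail := by
  induction tail with
  | nil => simp [esaCnt, esaPhase2]
  | cons l r ih =>
    by_cases h : (PySem.Chars.startswith l.toList ['>'] = true ∧ PySem.Chars.startswith l.toList ['>', ' ', '*', '*'] = false) <;>
      simp [esaCnt, esaPhase2, h, ih, List.take_succ_cons]

theorem esaEnumShift {α : Type} (xs : List α) : ∀ s : Int,
    PySem.List.enumerate xs (s + 1) = (PySem.List.enumerate xs s).map (fun p => (p.1 + 1, p.2)) := by
  induction xs with
  | nil => intro s; simp [PySem.List.enumerate_nil]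
  | cons x r ih => intro s; simp [PySem.List.enumerate_cons, ih (s + 1)]

theorem esaHits_nonneg (lines : List String) {i : Int} {l : String} {t : List (Int × String)}
    (h : esaHits lines = (i, l) :: t) : 0 ≤ i := by
  have hm : (i, l) ∈ esaHits lines := by rw [h]; exact List.mem_cons_self
  have := List.mem_of_mem_filter hm
  rw [PySem.List.mem_enumerate_iff] at this
  obtain ⟨k, hk, hp⟩ := this
  have : i = 0 + (k : Int) := congrArg Prod.fst hp
  omega

theorem esaBMain_eq (lines : List String) : esaBMain lines = PySem.Str.join "\n" (esaSpec lines) := by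
  induction lines with
  | nil => simp [esaBMain, esaHits, esaSpec, PySem.List.enumerate_nil]; decide
  | cons x r ih =>
    by_cases hx : PySem.Chars.startswith x.toList esaHdr.toList = true
    · have hh : esaHits (x :: r) =
          (0, x) :: ((PySem.List.enumerate r 1).filter (fun p => PySem.Str.startswith p.2 esaHdr)) := by
        unfold esaHits
        rw [PySem.List.enumerate_cons, List.filter_cons]
        simp [hx]
      have hrun := esaRun_eq r 0
      simp only [List.drop_zero, Nat.zero_add] at hrun
      have h1 : PySem.List.slice (x :: r) (some ((0 : Int) + 1)) none = r := by
        norm_num [PySem.List.slice_from_one]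
      simp only [esaBMain, hh, h1, hrun, PySem.List.slice_to_natCast]
      have hp := esaPhase2_eq_take r
      rw [List.map_take] at hp
      simp [esaSpec, hx, hp]
    · have h0 : esaSpec (x :: r) = esaSpec r := by simp [esaSpec, hx]
      have shift : esaHits (x :: r) = (esaHits r).map (fun p => ((p.1 + 1 : Int), p.2)) := by
        unfold esaHits
        rw [PySem.List.enumerate_cons, List.filter_cons]
        have he := esaEnumShift r 0
        norm_num at he
        norm_num [hx, he, List.filter_map]
        rfl
      rw [h0, ← ih]
      rcases hr : esaHits r with _ | ⟨⟨i, l⟩, t⟩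
      · simp [esaBMain, shift, hr]
      · have hi : 0 ≤ i := esaHits_nonneg r hr
        have htail : PySem.List.slice (x :: r) (some (i + 1 + 1)) none =
            PySem.List.slice r (some (i + 1)) none := by
          rw [PySem.List.slice_from _ (by omega), PySem.List.slice_from _ (by omega)]
          have h2 : (i + 1 + 1).toNat = (i + 1).toNat + 1 := by omega
          rw [h2, List.drop_succ_cons]
        simp only [esaBMain, shift, hr, List.map_cons, htail]

theorem extract_short_answer_eq (content : String) :
    extract_short_answer content = extract_short_answer_alt content := by
  unfold extract_short_answer extract_short_answer_alt
  rw [esaBMain_eq, esaLoopA_false]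
  simp

-- ===== VERDICT (by name: the statement is the Claim_ definition above) =====
theorem extract_short_answer_spec : Claim_equal_extract_short_answer := by
  intro content _
  unfold Spec_extract_short_answer
  exact extract_short_answer_eq content
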